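-- pv_equiv track=rewrite | github.com/vanwnhatne12/Api-sunwin-vip-pro | app.py | current_streak
-- ===== SOURCE A (Python) =====
-- def current_streak(results):
--     """Trả về (độ dài chuỗi bệt hiện tại, 'Tài'/'Xỉu' hoặc None)."""
--     if not results:
--         return 0, None
--     side = results[-1]
--     streak = 1
--     for r in reversed(results[:-1]):
--         if r == side:
--             streak += 1
--         else:
--             break
--     return streak, side
-- ===== SOURCE B (Python) =====
-- def current_streak(results):
--     """Trả về (độ dài chuỗi bệt hiện tại, 'Tài'/'Xỉu' hoặc None)."""
--     if not results:
--         return 0, None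
--     side = results[-1]
--     last_diff = -1
--     for j, r in enumerate(results):
--         if r != side:
--             last_diff = j
--     return len(results) - 1 - last_diff, side
-- ===== Notes on version B (the rewrite author's own statement) =====
-- stated objective: alternative
-- what changed: Instead of walking the reversed list and breaking at the first mismatch, B makes one forward pass recording the last index whose element differs from the final element and derives the streak as len - 1 - last_diff.
import Mathlib
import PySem

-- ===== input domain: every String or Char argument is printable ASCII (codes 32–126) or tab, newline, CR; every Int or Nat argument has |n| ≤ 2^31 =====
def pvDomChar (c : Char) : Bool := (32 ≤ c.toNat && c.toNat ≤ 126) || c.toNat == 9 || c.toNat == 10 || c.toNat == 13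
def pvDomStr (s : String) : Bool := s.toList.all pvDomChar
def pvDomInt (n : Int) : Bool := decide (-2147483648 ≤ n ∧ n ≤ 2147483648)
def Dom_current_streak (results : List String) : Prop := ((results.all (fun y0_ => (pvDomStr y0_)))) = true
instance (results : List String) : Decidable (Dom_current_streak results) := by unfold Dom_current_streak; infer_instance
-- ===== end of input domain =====

-- B replaces A's reversed scan-with-break by a single forward pass tracking the last differing index (objective: alternative).

-- ===== PORT A =====
-- the 'for r in reversed(results[:-1]): if r == side: streak += 1 else: break' loop
def csLoopA (side : String) : List String → Int → Int
  | [], streak => streak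
  | r :: rs, streak => if r == side then csLoopA side rs (streak + 1) else streak

def current_streak (results : List String) : Int × Option String :=
  match PySem.List.pyGet? results (-1) with
  | none => (0, none)                          -- 'if not results: return 0, None'
  | some side =>
      (csLoopA side (PySem.List.slice results none (some (-1))).reverse 1, some side)

-- ===== PORT B =====
def current_streak_alt (results : List String) : Int × Option String :=
  match PySem.List.pyGet? results (-1) with
  | none => (0, none)
  | some side =>
      let lastDiff := (PySem.List.enumerate results 0).foldl
        (fun acc p => if p.2 != side then p.1 else acc) (-1)
      ((results.length : Int) - 1 - lastDiff, some side)

-- ===== PRECONDITION & SPEC =====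
def Spec_current_streak (results : List String) (out : Int × Option String) : Prop := out = current_streak_alt results
instance (results : List String) (out : Int × Option String) : Decidable (Spec_current_streak results out) := by unfold Spec_current_streak; infer_instance

-- ===== CLAIM (what is proved, stated in full; the proofs are below) =====
def Claim_equal_current_streak : Prop := ∀ (results : List String), Dom_current_streak results → Spec_current_streak results (current_streak results)

-- ===== LEMMAS AND PROOFS =====

-- A's loop counts the leading run of `side` in its input, offset by the accumulator.
theorem csLoopA_char (side : String) (l : List String) (s : Int) :
    csLoopA side l s = s + ((l.takeWhile (· == side)).length : Int) := by
  induction l generalizing s with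
  | nil => simp [csLoopA]
  | cons r rs ih =>
      by_cases h : r == side
      · simp [csLoopA, h, ih]; ring
      · simp [csLoopA, h]

-- B's forward fold: len - 1 - lastDiff equals the leading run of `side` in the reversed list.
theorem lastDiff_char (side : String) (xs : List String) :
    (xs.length : Int) - 1 -
      (PySem.List.enumerate xs 0).foldl (fun acc p => if p.2 != side then p.1 else acc) (-1)
    = ((xs.reverse.takeWhile (· == side)).length : Int) := by
  induction xs using List.reverseRecOn with
  | nil => simp
  | append_singleton ys x ih =>
      rw [PySem.List.enumerate_append, List.foldl_append,
        PySem.List.enumerate_cons, PySem.List.enumerate_nil, List.foldl_cons, List.foldl_nil,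
        List.reverse_append, List.reverse_singleton, List.singleton_append, List.takeWhile_cons]
      by_cases hx : x = side
      · have hb : (x != side) = false := by simp [hx]
        have he : (x == side) = true := by simp [hx]
        rw [hb, he]
        simp only [Bool.false_eq_true, if_false, if_true, List.length_cons, List.length_append, List.length_nil]
        push_cast
        omega
      · have hb : (x != side) = true := by simp [hx]
        have he : (x == side) = false := by simp [hx]
        rw [hb, he]
        simp only [Bool.false_eq_true, if_true, if_false, List.length_nil, List.length_append, List.length_cons]
        push_cast
        omega

-- ===== VERDICT (by name: the statement is the Claim_ definition above) =====
theorem current_streak_spec : Claim_equal_current_streak := by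
  intro results _
  unfold Spec_current_streak current_streak current_streak_alt
  rcases hres : results with _ | ⟨a, as⟩
  · simp [PySem.List.pyGet?]
  · rw [← hres]
    have hne : results ≠ [] := by rw [hres]; exact List.cons_ne_nil _ _
    have hget : PySem.List.pyGet? results (-1) = some (results.getLast hne) := by
      rw [PySem.List.pyGet?_neg_one, List.getLast?_eq_some_getLast (l := results) (h := hne)]
    rw [hget]
    dsimp only
    set side := results.getLast hne with hside
    have hdecomp : results = results.dropLast ++ [side] :=
      (List.dropLast_append_getLast hne).symm
    rw [PySem.List.slice_to_neg_one, csLoopA_char]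
    have hb := lastDiff_char side results
    have hrev : results.reverse = side :: results.dropLast.reverse := by
      conv_lhs => rw [hdecomp]
      simp
    rw [hrev] at hb
    simp only [List.takeWhile, BEq.rfl, List.length_cons] at hb
    simp only [Prod.mk.injEq, and_true]
    push_cast at hb ⊢
    omega
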